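-- pv_equiv track=rewrite | github.com/Dithedy/ProyectosPython | Proyecto_matrix.py | get_neighbour_indices
-- ===== SOURCE A (Python) =====
-- def first_coord(coordenates):
--     return coordenates[0]
--
-- def second_coord(coordenates):
--     return coordenates[1]
--
-- def get_neighbour_indices(matrix, list_of_coordenates):
--     indexes = []
--     final_list = []
--     # ya tengo las coordenadas que voy a recibir de una en una, del que se va a evaluar en este momento, asi que busco sus vecinos con ifs
--     # primero con las condiciones de la fila (i), y luego de la columna(j), comprobando que los vecinos existen en la matriz
--     for i in list_of_coordenates:
--         new_list_neighbours = []
--         indexes.append(new_list_neighbours)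
--         clean_list = []
--         final_list.append(clean_list)
--
--         for j in i:
--
--             #neighbour_right
--             new_list_neighbours.append([first_coord(j), second_coord(j) +1])
--             #neighbour_left
--             new_list_neighbours.append([first_coord(j), second_coord(j) -1])
--             #neighbour_down
--             new_list_neighbours.append([first_coord(j) +1, second_coord(j)])
--             #neighbour_up
--             new_list_neighbours.append([first_coord(j)-1, second_coord(j)])
--             #incluyo al propio elemento como vecino de si mismo
--             new_list_neighbours.append([first_coord(j), second_coord(j)])
--
--             #new_list_neighbours = list(filter(lambda coord: coord[0] >= 0 and coord[0] < len(matrix) and coord[1] >= 0 and coord[1] < len (matrix[0]), new_list_neighbours))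
--             filtered_list_neighbours = filter_neighbours(matrix, new_list_neighbours)
--             clean_list.append(filtered_list_neighbours)
--
--     return final_list
--
-- def filter_neighbours(matrix, list_neighbours):
--     new_list = []
--     for lista in list_neighbours:
--          if lista[0] >= 0 and lista[0] < len(matrix) and lista[1] >= 0 and lista[1] < len(matrix[0]):
--             new_list.append(lista)
--
--     return new_list
-- ===== SOURCE B (Python) =====
-- def get_neighbour_indices(matrix, list_of_coordenates):
--     rows = len(matrix)
--     cols = len(matrix[0]) if matrix else 0
--     final_list = []
--     for group in list_of_coordenates:
--         running = []
--         clean_list = []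
--         for j in group:
--             x, y = j[0], j[1]
--             cands = [(x, y + 1), (x, y - 1), (x + 1, y), (x - 1, y), (x, y)]
--             running.extend([a, b] for (a, b) in cands
--                            if 0 <= a < rows and 0 <= b < cols)
--             clean_list.append(running[:])
--         final_list.append(clean_list)
--     return final_list
-- ===== Notes on version B (the rewrite author's own statement) =====
-- stated objective: faster
-- what changed: B keeps one running list of already-filtered neighbours per group, filters only the 5 new candidates of each coordinate and appends a copy of the running list, instead of A's re-filtering of the entire growing accumulator at every step; bounds are computed once.
import Mathlib
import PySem

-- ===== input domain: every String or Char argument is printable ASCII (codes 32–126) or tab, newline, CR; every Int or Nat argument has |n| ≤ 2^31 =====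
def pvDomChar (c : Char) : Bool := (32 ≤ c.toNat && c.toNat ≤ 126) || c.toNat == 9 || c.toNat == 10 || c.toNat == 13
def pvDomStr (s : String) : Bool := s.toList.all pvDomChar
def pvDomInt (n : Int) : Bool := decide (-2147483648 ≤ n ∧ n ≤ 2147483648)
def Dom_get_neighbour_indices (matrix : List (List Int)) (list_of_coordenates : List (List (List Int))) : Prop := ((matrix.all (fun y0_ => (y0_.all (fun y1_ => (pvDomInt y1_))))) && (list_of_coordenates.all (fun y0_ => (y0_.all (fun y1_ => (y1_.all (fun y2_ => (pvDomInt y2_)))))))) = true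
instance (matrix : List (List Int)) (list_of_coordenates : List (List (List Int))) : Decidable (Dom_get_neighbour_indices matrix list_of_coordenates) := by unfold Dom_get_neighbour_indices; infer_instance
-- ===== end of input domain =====

-- B computes each step's filtered prefix incrementally (filter only the 5 new candidates and
-- extend a running list) instead of A's re-filtering of the whole growing accumulator; objective: faster.


-- ===== PORT A =====
-- first_coord / second_coord: coordenates[0], coordenates[1]; .getD 0 is exact under Pre_ (length ≥ 2)
def pvFirstCoord (coordenates : List Int) : Int := (PySem.List.pyGet? coordenates 0).getD 0
def pvSecondCoord (coordenates : List Int) : Int := (PySem.List.pyGet? coordenates 1).getD 0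

-- filter_neighbours: every element appended by A has length 2, so lista[0]/lista[1] never raise;
-- len(matrix[0]) is only reached when lista[0] < len(matrix), i.e. matrix ≠ [] (Python short-circuit),
-- so (pyGet? matrix 0).getD [] is exact.
def pvFilterNeighbours (matrix : List (List Int)) (list_neighbours : List (List Int)) : List (List Int) :=
  list_neighbours.foldl (fun new_list lista =>
    if 0 ≤ (PySem.List.pyGet? lista 0).getD 0 ∧
       (PySem.List.pyGet? lista 0).getD 0 < (matrix.length : Int) ∧
       0 ≤ (PySem.List.pyGet? lista 1).getD 0 ∧
       (PySem.List.pyGet? lista 1).getD 0 < (((PySem.List.pyGet? matrix 0).getD []).length : Int)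
    then new_list ++ [lista] else new_list) []

def get_neighbour_indices (matrix : List (List Int)) (list_of_coordenates : List (List (List Int))) : List (List (List (List Int))) :=
  (list_of_coordenates.foldl (fun final_list i =>
     let inner := i.foldl (fun (st : List (List Int) × List (List (List Int))) j =>
        let nb := st.1
          ++ [[pvFirstCoord j, pvSecondCoord j + 1]]
          ++ [[pvFirstCoord j, pvSecondCoord j - 1]]
          ++ [[pvFirstCoord j + 1, pvSecondCoord j]]
          ++ [[pvFirstCoord j - 1, pvSecondCoord j]]
          ++ [[pvFirstCoord j, pvSecondCoord j]]
        (nb, st.2 ++ [pvFilterNeighbours matrix nb])) ([], [])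
     final_list ++ [inner.2]) [])

-- ===== PORT B =====
def pvCand5 (x y : Int) : List (Int × Int) := [(x, y + 1), (x, y - 1), (x + 1, y), (x - 1, y), (x, y)]

def get_neighbour_indices_alt (matrix : List (List Int)) (list_of_coordenates : List (List (List Int))) : List (List (List (List Int))) :=
  let rows : Int := matrix.length
  let cols : Int := match matrix with | [] => 0 | r :: _ => (r.length : Int)
  list_of_coordenates.map (fun group =>
    (group.foldl (fun (st : List (List Int) × List (List (List Int))) j =>
       let x := (PySem.List.pyGet? j 0).getD 0
       let y := (PySem.List.pyGet? j 1).getD 0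
       let new := ((pvCand5 x y).filter
           (fun p => decide (0 ≤ p.1) && decide (p.1 < rows) && decide (0 ≤ p.2) && decide (p.2 < cols))).map
           (fun p => [p.1, p.2])
       (st.1 ++ new, st.2 ++ [st.1 ++ new])) ([], [])).2)

-- ===== PRECONDITION & SPEC =====
-- Pre_ excludes exactly the inputs on which Python A raises IndexError: a coordinate with fewer than
-- two components (j[0]/j[1] out of range). B raises there too.
def Pre_get_neighbour_indices (matrix : List (List Int)) (list_of_coordenates : List (List (List Int))) : Prop :=
  ∀ i ∈ list_of_coordenates, ∀ j ∈ i, 2 ≤ j.length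
instance (matrix : List (List Int)) (list_of_coordenates : List (List (List Int))) : Decidable (Pre_get_neighbour_indices matrix list_of_coordenates) := by unfold Pre_get_neighbour_indices; infer_instance

def pvWitness_get_neighbour_indices : List (List Int) × List (List (List Int)) :=
  ([[1, 2], [3, 4]], [[[0, 0], [0, 1]], [[1, 1]]])

def Spec_get_neighbour_indices (matrix : List (List Int)) (list_of_coordenates : List (List (List Int))) (out : List (List (List (List Int)))) : Prop := out = get_neighbour_indices_alt matrix list_of_coordenates
instance (matrix : List (List Int)) (list_of_coordenates : List (List (List Int))) (out : List (List (List (List Int)))) : Decidable (Spec_get_neighbour_indices matrix list_of_coordenates out) := by unfold Spec_get_neighbour_indices; infer_instance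

-- ===== CLAIM (what is proved, stated in full; the proofs are below) =====
def Claim_equal_get_neighbour_indices : Prop := ∀ (matrix : List (List Int)) (list_of_coordenates : List (List (List Int))), Dom_get_neighbour_indices matrix list_of_coordenates → Pre_get_neighbour_indices matrix list_of_coordenates → Spec_get_neighbour_indices matrix list_of_coordenates (get_neighbour_indices matrix list_of_coordenates)

-- ===== LEMMAS AND PROOFS =====

def pvOkA (matrix : List (List Int)) (lista : List Int) : Bool :=
  decide (0 ≤ (PySem.List.pyGet? lista 0).getD 0 ∧
     (PySem.List.pyGet? lista 0).getD 0 < (matrix.length : Int) ∧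
     0 ≤ (PySem.List.pyGet? lista 1).getD 0 ∧
     (PySem.List.pyGet? lista 1).getD 0 < (((PySem.List.pyGet? matrix 0).getD []).length : Int))

def pvOkB (matrix : List (List Int)) (p : Int × Int) : Bool :=
  decide (0 ≤ p.1) && decide (p.1 < (matrix.length : Int)) && decide (0 ≤ p.2) &&
    decide (p.2 < (((PySem.List.pyGet? matrix 0).getD []).length : Int))

theorem pvFilterNeighbours_eq_filter (matrix : List (List Int)) (ls : List (List Int)) :
    pvFilterNeighbours matrix ls = ls.filter (pvOkA matrix) := by
  unfold pvFilterNeighbours pvOkA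
  rw [PySem.List.foldl_append_ite_eq_filter]
  simp

theorem pvColsEq (matrix : List (List Int)) :
    (match matrix with | [] => (0 : Int) | r :: _ => (r.length : Int))
      = ((((PySem.List.pyGet? matrix 0).getD []).length : Int)) := by
  cases matrix <;> simp [PySem.List.pyGet?, PySem.List.pyIdx?]

theorem pvOkA_pair (matrix : List (List Int)) (p : Int × Int) :
    pvOkA matrix [p.1, p.2] = pvOkB matrix p := by
  simp [pvOkA, pvOkB, PySem.List.pyGet?, PySem.List.pyIdx?, Bool.and_assoc]

theorem pvFiveFilter (matrix : List (List Int)) (x y : Int) :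
    ([x, y + 1] :: [x, y - 1] :: [x + 1, y] :: [x - 1, y] :: [x, y] :: ([] : List (List Int))).filter (pvOkA matrix)
      = ((pvCand5 x y).filter (pvOkB matrix)).map (fun p => [p.1, p.2]) := by
  have h : ([x, y + 1] :: [x, y - 1] :: [x + 1, y] :: [x - 1, y] :: [x, y] :: ([] : List (List Int)))
      = (pvCand5 x y).map (fun p => [p.1, p.2]) := by simp [pvCand5]
  rw [h, List.filter_map]
  congr 1
  apply List.filter_congr
  intro p _
  exact pvOkA_pair matrix p

theorem pvInnerEq (matrix : List (List Int)) (group : List (List Int)) (acc : List (List Int))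
    (clean : List (List (List Int))) :
    (group.foldl (fun (st : List (List Int) × List (List (List Int))) j =>
       let x := (PySem.List.pyGet? j 0).getD 0
       let y := (PySem.List.pyGet? j 1).getD 0
       let new := ((pvCand5 x y).filter (pvOkB matrix)).map (fun p => [p.1, p.2])
       (st.1 ++ new, st.2 ++ [st.1 ++ new])) (pvFilterNeighbours matrix acc, clean))
    = (let r := group.foldl (fun (st : List (List Int) × List (List (List Int))) j =>
        let nb := st.1
          ++ [[pvFirstCoord j, pvSecondCoord j + 1]]
          ++ [[pvFirstCoord j, pvSecondCoord j - 1]]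
          ++ [[pvFirstCoord j + 1, pvSecondCoord j]]
          ++ [[pvFirstCoord j - 1, pvSecondCoord j]]
          ++ [[pvFirstCoord j, pvSecondCoord j]]
        (nb, st.2 ++ [pvFilterNeighbours matrix nb])) (acc, clean)
       (pvFilterNeighbours matrix r.1, r.2)) := by
  induction group generalizing acc clean with
  | nil => simp
  | cons j tl ih =>
    simp only [List.foldl_cons]
    have hnb : pvFilterNeighbours matrix (acc
          ++ [[pvFirstCoord j, pvSecondCoord j + 1]]
          ++ [[pvFirstCoord j, pvSecondCoord j - 1]]
          ++ [[pvFirstCoord j + 1, pvSecondCoord j]]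
          ++ [[pvFirstCoord j - 1, pvSecondCoord j]]
          ++ [[pvFirstCoord j, pvSecondCoord j]])
        = pvFilterNeighbours matrix acc
          ++ ((pvCand5 ((PySem.List.pyGet? j 0).getD 0) ((PySem.List.pyGet? j 1).getD 0)).filter
              (pvOkB matrix)).map (fun p => [p.1, p.2]) := by
      have hlist : acc
          ++ [[pvFirstCoord j, pvSecondCoord j + 1]]
          ++ [[pvFirstCoord j, pvSecondCoord j - 1]]
          ++ [[pvFirstCoord j + 1, pvSecondCoord j]]
          ++ [[pvFirstCoord j - 1, pvSecondCoord j]]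
          ++ [[pvFirstCoord j, pvSecondCoord j]]
        = acc ++ ([pvFirstCoord j, pvSecondCoord j + 1] :: [pvFirstCoord j, pvSecondCoord j - 1]
            :: [pvFirstCoord j + 1, pvSecondCoord j] :: [pvFirstCoord j - 1, pvSecondCoord j]
            :: [pvFirstCoord j, pvSecondCoord j] :: []) := by simp
      rw [hlist, pvFilterNeighbours_eq_filter, List.filter_append, pvFiveFilter,
        ← pvFilterNeighbours_eq_filter, pvFirstCoord, pvSecondCoord]
    simp only [← hnb]
    exact ih _ _

theorem get_neighbour_indices_spec : Claim_equal_get_neighbour_indices := by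
  intro matrix locs _ _
  unfold Spec_get_neighbour_indices get_neighbour_indices get_neighbour_indices_alt
  rw [PySem.List.foldl_append_singleton_eq_map]
  simp only [List.nil_append, pvColsEq]
  apply List.map_congr_left
  intro group _
  have h := congrArg Prod.snd (pvInnerEq matrix group [] [])
  simpa [pvFilterNeighbours] using h.symm
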